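-- pv_equiv track=rewrite | github.com/Yhonsa/Kanbal | S1/tp6/chaines.py | my_len
-- ===== SOURCE A (Python) =====
-- def my_len(n):
--     """
--     Fonction qui renvoie la longueur de la chaîne de caractères qu'on lui passe en paramètres.
--     CU: n doit être une chaîne de caractères.
--     Exemples:
--     >>> my_len('Timoleon')
--     8
--     >>> my_len('Annabelle')
--     9
--     """
--     assert type(n) == str, 'n doit être une chaîne de caractères'
--     s = n
--     x = 0
--     for c in s:
--         if c != '':
--             x = x + 1
--     return x        #Longueur d'une chaîne
-- ===== SOURCE B (Python) =====
-- def my_len(n):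
--     assert type(n) == str, 'n doit être une chaîne de caractères'
--     return len(n)
-- ===== Notes on version B (the rewrite author's own statement) =====
-- stated objective: simpler
-- what changed: Replaces the manual accumulator loop (with its always-true `c != ''` guard) by a direct `len(n)` call after the same type assertion.
import Mathlib
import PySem

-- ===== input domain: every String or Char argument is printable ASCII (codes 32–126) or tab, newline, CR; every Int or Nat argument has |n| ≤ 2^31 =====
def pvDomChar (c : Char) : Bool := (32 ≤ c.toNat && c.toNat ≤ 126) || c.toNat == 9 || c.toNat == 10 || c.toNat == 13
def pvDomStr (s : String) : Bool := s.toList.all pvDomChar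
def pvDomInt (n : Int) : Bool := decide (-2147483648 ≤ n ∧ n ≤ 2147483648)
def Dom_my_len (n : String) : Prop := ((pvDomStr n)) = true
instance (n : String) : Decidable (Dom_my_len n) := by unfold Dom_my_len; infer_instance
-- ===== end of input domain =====

-- B replaces A's accumulator loop (with its always-true `c != ''` guard) by the builtin length.

-- ===== PORT A =====
-- loop `for c in s: if c != '': x = x + 1` — in Python each c is a one-char string, compared to ''
def my_len (n : String) : Int :=
  let s := n
  s.toList.foldl (fun x c => if String.ofList [c] ≠ "" then x + 1 else x) 0

-- ===== PORT B =====
def my_len_alt (n : String) : Int := PySem.Str.len n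

-- ===== PRECONDITION & SPEC =====
def Spec_my_len (n : String) (out : Int) : Prop := out = my_len_alt n
instance (n : String) (out : Int) : Decidable (Spec_my_len n out) := by unfold Spec_my_len; infer_instance

-- ===== CLAIM (what is proved, stated in full; the proofs are below) =====
def Claim_equal_my_len : Prop := ∀ (n : String), Dom_my_len n → Spec_my_len n (my_len n)

-- ===== LEMMAS AND PROOFS =====
theorem my_len_foldl (l : List Char) (x : Int) :
    l.foldl (fun x c => if String.ofList [c] ≠ "" then x + 1 else x) x = x + l.length := by
  induction l generalizing x with
  | nil => simp
  | cons c t ih =>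
    have h : String.ofList [c] ≠ "" := by
      intro h
      have h2 := congrArg List.length (congrArg String.toList h)
      simp at h2
    rw [List.foldl_cons, if_pos h, ih]
    simp only [List.length_cons]
    push_cast
    ring

-- ===== VERDICT (by name: the statement is the Claim_ definition above) =====
theorem my_len_spec : Claim_equal_my_len := by
  intro n _
  unfold Spec_my_len my_len my_len_alt
  rw [my_len_foldl]
  simp [PySem.Str.len]
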